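-- pv_equiv track=rewrite | github.com/acekapila/nexus | ai-article-generator/enhanced_complete_article_system.py | _build_deep_research_context
-- ===== SOURCE A (Python) =====
-- from typing import Dict, List, Optional
--
-- def _build_deep_research_context(research_data: Dict) -> str:
--     """Build enhanced research context from deep learning data (existing method)"""
--
--     context_parts = []
--
--     # Core themes and consensus
--     core_themes = research_data.get("core_themes", [])
--     if core_themes:
--         context_parts.append(f"CORE THEMES IDENTIFIED:\n" + "\n".join(f"- {theme}" for theme in core_themes))
--
--     consensus_findings = research_data.get("consensus_findings", [])
--     if consensus_findings:
--         context_parts.append(f"EXPERT CONSENSUS:\n" + "\n".join(f"- {finding}" for finding in consensus_findings))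
--
--     # Deep insights from article analysis
--     deep_insights = research_data.get("deep_insights", [])
--     if deep_insights:
--         context_parts.append(f"DEEP INSIGHTS FROM ARTICLES:\n" + "\n".join(f"- {insight}" for insight in deep_insights[:10]))
--
--     # Evidence-based statistics
--     evidence_stats = research_data.get("evidence_based_statistics", [])
--     if evidence_stats:
--         context_parts.append(f"EVIDENCE-BASED STATISTICS:\n" + "\n".join(f"- {stat}" for stat in evidence_stats[:8]))
--
--     # Novel insights not commonly covered
--     novel_insights = research_data.get("novel_insights", [])
--     if novel_insights:
--         context_parts.append(f"NOVEL INSIGHTS FOR DIFFERENTIATION:\n" + "\n".join(f"- {insight}" for insight in novel_insights))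
--
--     # Advanced considerations
--     advanced_considerations = research_data.get("advanced_considerations", [])
--     if advanced_considerations:
--         context_parts.append(f"ADVANCED CONSIDERATIONS:\n" + "\n".join(f"- {consideration}" for consideration in advanced_considerations))
--
--     # Knowledge gaps to address
--     knowledge_gaps = research_data.get("knowledge_gaps", [])
--     if knowledge_gaps:
--         context_parts.append(f"KNOWLEDGE GAPS TO ADDRESS:\n" + "\n".join(f"- {gap}" for gap in knowledge_gaps))
--
--     # Content opportunities
--     content_opportunities = research_data.get("content_opportunities", [])
--     if content_opportunities:
--         context_parts.append(f"CONTENT DIFFERENTIATION OPPORTUNITIES:\n" + "\n".join(f"- {opportunity}" for opportunity in content_opportunities))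
--
--     # Practical applications
--     practical_applications = research_data.get("practical_applications", [])
--     if practical_applications:
--         context_parts.append(f"PRACTICAL APPLICATIONS:\n" + "\n".join(f"- {application}" for application in practical_applications[:6]))
--
--     return "\n\n".join(context_parts)
-- ===== SOURCE B (Python) =====
-- _SPEC = {
--     "core_themes": (0, "CORE THEMES IDENTIFIED:", None),
--     "consensus_findings": (1, "EXPERT CONSENSUS:", None),
--     "deep_insights": (2, "DEEP INSIGHTS FROM ARTICLES:", 10),
--     "evidence_based_statistics": (3, "EVIDENCE-BASED STATISTICS:", 8),
--     "novel_insights": (4, "NOVEL INSIGHTS FOR DIFFERENTIATION:", None),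
--     "advanced_considerations": (5, "ADVANCED CONSIDERATIONS:", None),
--     "knowledge_gaps": (6, "KNOWLEDGE GAPS TO ADDRESS:", None),
--     "content_opportunities": (7, "CONTENT DIFFERENTIATION OPPORTUNITIES:", None),
--     "practical_applications": (8, "PRACTICAL APPLICATIONS:", 6),
-- }
--
--
-- def _build_deep_research_context(research_data):
--     """Single pass over the input dict: dispatch each recognised key into its
--     rank slot (first binding wins, like dict lookup), then emit slots in rank order."""
--     slots = {}
--     for key, values in research_data.items():
--         spec = _SPEC.get(key)
--         if spec is not None:
--             rank, header, limit = spec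
--             slots.setdefault(
--                 rank,
--                 (header + "\n" + "\n".join("- " + v for v in values[:limit]))
--                 if values else None,
--             )
--     parts = [slots.get(r) for r in range(len(_SPEC))]
--     return "\n\n".join(p for p in parts if p is not None)
-- ===== Notes on version B (the rewrite author's own statement) =====
-- stated objective: alternative
-- what changed: Inverted the traversal: instead of A's nine hardcoded per-section dict lookups, B makes a single pass over the input dict's items, dispatching each recognised key into a rank slot via a spec table, then emits the slots in rank order.
import Mathlib
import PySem

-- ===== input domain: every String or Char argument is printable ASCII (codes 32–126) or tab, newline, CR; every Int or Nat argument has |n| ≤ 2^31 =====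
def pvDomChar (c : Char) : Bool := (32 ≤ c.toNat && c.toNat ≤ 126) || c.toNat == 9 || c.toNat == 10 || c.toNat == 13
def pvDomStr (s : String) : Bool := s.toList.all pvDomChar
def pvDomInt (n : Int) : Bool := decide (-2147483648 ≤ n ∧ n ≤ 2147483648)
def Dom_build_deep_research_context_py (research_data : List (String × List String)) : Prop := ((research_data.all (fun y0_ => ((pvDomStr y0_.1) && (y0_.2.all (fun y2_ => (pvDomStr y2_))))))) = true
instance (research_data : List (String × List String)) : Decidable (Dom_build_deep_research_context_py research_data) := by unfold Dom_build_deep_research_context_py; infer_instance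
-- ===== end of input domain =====

-- B replaces A's nine hardcoded per-section lookups with ONE pass over the input dict,
-- dispatching each recognised key into a rank slot and emitting slots in rank order (objective: alternative).

-- "\n".join(f"- {x}" for x in xs)
def pvBullets (xs : List String) : String :=
  PySem.Str.join "\n" (xs.map (fun x => "- " ++ x))

-- ===== PORT A =====
def pvGet (research_data : List (String × List String)) (k : String) : List String :=
  (PySem.Dict.mk research_data).getD k []

def build_deep_research_context_py (research_data : List (String × List String)) : String :=
  let context_parts : List String := []
  let core_themes := pvGet research_data "core_themes"
  let context_parts := if core_themes ≠ [] then
      context_parts ++ ["CORE THEMES IDENTIFIED:" ++ "\n" ++ pvBullets core_themes] else context_parts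
  let consensus_findings := pvGet research_data "consensus_findings"
  let context_parts := if consensus_findings ≠ [] then
      context_parts ++ ["EXPERT CONSENSUS:" ++ "\n" ++ pvBullets consensus_findings] else context_parts
  let deep_insights := pvGet research_data "deep_insights"
  let context_parts := if deep_insights ≠ [] then
      context_parts ++ ["DEEP INSIGHTS FROM ARTICLES:" ++ "\n" ++ pvBullets (PySem.List.slice deep_insights none (some 10))] else context_parts
  let evidence_stats := pvGet research_data "evidence_based_statistics"
  let context_parts := if evidence_stats ≠ [] then
      context_parts ++ ["EVIDENCE-BASED STATISTICS:" ++ "\n" ++ pvBullets (PySem.List.slice evidence_stats none (some 8))] else context_parts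
  let novel_insights := pvGet research_data "novel_insights"
  let context_parts := if novel_insights ≠ [] then
      context_parts ++ ["NOVEL INSIGHTS FOR DIFFERENTIATION:" ++ "\n" ++ pvBullets novel_insights] else context_parts
  let advanced_considerations := pvGet research_data "advanced_considerations"
  let context_parts := if advanced_considerations ≠ [] then
      context_parts ++ ["ADVANCED CONSIDERATIONS:" ++ "\n" ++ pvBullets advanced_considerations] else context_parts
  let knowledge_gaps := pvGet research_data "knowledge_gaps"
  let context_parts := if knowledge_gaps ≠ [] then
      context_parts ++ ["KNOWLEDGE GAPS TO ADDRESS:" ++ "\n" ++ pvBullets knowledge_gaps] else context_parts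
  let content_opportunities := pvGet research_data "content_opportunities"
  let context_parts := if content_opportunities ≠ [] then
      context_parts ++ ["CONTENT DIFFERENTIATION OPPORTUNITIES:" ++ "\n" ++ pvBullets content_opportunities] else context_parts
  let practical_applications := pvGet research_data "practical_applications"
  let context_parts := if practical_applications ≠ [] then
      context_parts ++ ["PRACTICAL APPLICATIONS:" ++ "\n" ++ pvBullets (PySem.List.slice practical_applications none (some 6))] else context_parts
  PySem.Str.join "\n\n" context_parts

-- ===== PORT B =====
-- the module-level _SPEC dict, as the association list of a PySem.Dict
def pvSpecTable : List (String × Int × String × Option Int) :=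
  [("core_themes", 0, "CORE THEMES IDENTIFIED:", none),
   ("consensus_findings", 1, "EXPERT CONSENSUS:", none),
   ("deep_insights", 2, "DEEP INSIGHTS FROM ARTICLES:", some 10),
   ("evidence_based_statistics", 3, "EVIDENCE-BASED STATISTICS:", some 8),
   ("novel_insights", 4, "NOVEL INSIGHTS FOR DIFFERENTIATION:", none),
   ("advanced_considerations", 5, "ADVANCED CONSIDERATIONS:", none),
   ("knowledge_gaps", 6, "KNOWLEDGE GAPS TO ADDRESS:", none),
   ("content_opportunities", 7, "CONTENT DIFFERENTIATION OPPORTUNITIES:", none),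
   ("practical_applications", 8, "PRACTICAL APPLICATIONS:", some 6)]

-- _SPEC.get(key)
def pvSpec (k : String) : Option (Int × String × Option Int) :=
  (PySem.Dict.mk pvSpecTable).get? k

-- (header + "\n" + "\n".join("- " + v for v in values[:limit])) if values else None
def pvRender (header : String) (limit : Option Int) (values : List String) : Option String :=
  if values ≠ [] then some (header ++ "\n" ++ pvBullets (PySem.List.slice values none limit)) else none

-- loop body: route one (key, values) item into its rank slot (setdefault = first binding wins)
def pvFoldStep (slots : PySem.Dict Int (Option String)) (kv : String × List String) :
    PySem.Dict Int (Option String) :=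
  match pvSpec kv.1 with
  | some (rank, header, limit) => slots.setdefault rank (pvRender header limit kv.2)
  | none => slots

def build_deep_research_context_py_alt (research_data : List (String × List String)) : String :=
  let slots := research_data.foldl pvFoldStep PySem.Dict.empty
  let parts := (PySem.List.pyRange 0 9 1).map (fun r => (slots.get? r).getD none)
  PySem.Str.join "\n\n" (parts.filterMap id)

-- ===== PRECONDITION & SPEC =====
def Spec_build_deep_research_context_py (research_data : List (String × List String)) (out : String) : Prop := out = build_deep_research_context_py_alt research_data
instance (research_data : List (String × List String)) (out : String) : Decidable (Spec_build_deep_research_context_py research_data out) := by unfold Spec_build_deep_research_context_py; infer_instance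

-- ===== CLAIM =====
def Claim_equal_build_deep_research_context_py : Prop := ∀ (research_data : List (String × List String)), Dom_build_deep_research_context_py research_data → Spec_build_deep_research_context_py research_data (build_deep_research_context_py research_data)

-- ===== LEMMAS AND PROOFS =====

-- proof-side tables: the section key / header / limit of each rank
def pvKeyOf (r : Int) : String :=
  if r = 0 then "core_themes" else if r = 1 then "consensus_findings"
  else if r = 2 then "deep_insights" else if r = 3 then "evidence_based_statistics"
  else if r = 4 then "novel_insights" else if r = 5 then "advanced_considerations"
  else if r = 6 then "knowledge_gaps" else if r = 7 then "content_opportunities"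
  else "practical_applications"

def pvHeaderOf (r : Int) : String :=
  if r = 0 then "CORE THEMES IDENTIFIED:" else if r = 1 then "EXPERT CONSENSUS:"
  else if r = 2 then "DEEP INSIGHTS FROM ARTICLES:" else if r = 3 then "EVIDENCE-BASED STATISTICS:"
  else if r = 4 then "NOVEL INSIGHTS FOR DIFFERENTIATION:" else if r = 5 then "ADVANCED CONSIDERATIONS:"
  else if r = 6 then "KNOWLEDGE GAPS TO ADDRESS:" else if r = 7 then "CONTENT DIFFERENTIATION OPPORTUNITIES:"
  else "PRACTICAL APPLICATIONS:"

def pvLimitOf (r : Int) : Option Int :=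
  if r = 2 then some 10 else if r = 3 then some 8 else if r = 8 then some 6 else none

def pvRanks : List Int := [0, 1, 2, 3, 4, 5, 6, 7, 8]

lemma pvSpec_keyOf (r : Int) (hr : r ∈ pvRanks) :
    pvSpec (pvKeyOf r) = some (r, pvHeaderOf r, pvLimitOf r) := by
  fin_cases hr <;> rfl

lemma pvSpec_some {k : String} {r : Int} {h : String} {l : Option Int}
    (hs : pvSpec k = some (r, h, l)) :
    k = pvKeyOf r ∧ h = pvHeaderOf r ∧ l = pvLimitOf r ∧ r ∈ pvRanks := by
  simp only [pvSpec, pvSpecTable, PySem.Dict.get?_mk_cons] at hs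
  split_ifs at hs with h1 h2 h3 h4 h5 h6 h7 h8 h9
  all_goals try simp only [Option.some.injEq, Prod.mk.injEq] at hs
  all_goals try (obtain ⟨rfl, rfl, rfl⟩ := hs)
  all_goals first
    | exact ⟨(eq_of_beq h1).symm, rfl, rfl, by decide⟩
    | exact ⟨(eq_of_beq h2).symm, rfl, rfl, by decide⟩
    | exact ⟨(eq_of_beq h3).symm, rfl, rfl, by decide⟩
    | exact ⟨(eq_of_beq h4).symm, rfl, rfl, by decide⟩
    | exact ⟨(eq_of_beq h5).symm, rfl, rfl, by decide⟩
    | exact ⟨(eq_of_beq h6).symm, rfl, rfl, by decide⟩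
    | exact ⟨(eq_of_beq h7).symm, rfl, rfl, by decide⟩
    | exact ⟨(eq_of_beq h8).symm, rfl, rfl, by decide⟩
    | exact ⟨(eq_of_beq h9).symm, rfl, rfl, by decide⟩

lemma pvKeyOf_inj {r r' : Int} (hr : r ∈ pvRanks) (hr' : r' ∈ pvRanks)
    (h : pvKeyOf r = pvKeyOf r') : r = r' := by
  fin_cases hr <;> fin_cases hr' <;> simp_all [pvKeyOf]

-- slots.setdefault on a fresh key is an insert
lemma setdefault_of_not_contains (d : PySem.Dict Int (Option String)) (k : Int) (v : Option String)
    (h : d.contains k = false) : d.setdefault k v = d.insert k v := by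
  apply PySem.Dict.ext
  rw [PySem.Dict.items_insert_of_not_contains _ _ h]
  simp [PySem.Dict.setdefault, h]

-- loop invariant: what the slot of rank r holds after folding the whole input
lemma pvFold_get? (rd : List (String × List String)) :
    ∀ (d : PySem.Dict Int (Option String)) (r : Int), r ∈ pvRanks →
    (rd.foldl pvFoldStep d).get? r =
      (d.get? r).or (((PySem.Dict.mk rd).get? (pvKeyOf r)).map
        (fun vs => pvRender (pvHeaderOf r) (pvLimitOf r) vs)) := by
  induction rd with
  | nil => intro d r _; simp [PySem.Dict.get?]
  | cons kv rest ih =>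
    intro d r hr
    obtain ⟨k, vs⟩ := kv
    rw [List.foldl_cons]
    rw [show (PySem.Dict.mk ((k, vs) :: rest)).get? (pvKeyOf r)
        = if k == pvKeyOf r then some vs else (PySem.Dict.mk rest).get? (pvKeyOf r)
        from PySem.Dict.get?_mk_cons ..]
    rcases hs : pvSpec k with _ | ⟨r', h', l'⟩
    · -- unrecognised key: state unchanged, and k cannot be the key of any rank
      have hk : (k == pvKeyOf r) = false := by
        rw [beq_eq_false_iff_ne]
        intro hkk
        rw [hkk, pvSpec_keyOf r hr] at hs
        simp at hs
      simp only [pvFoldStep, hs, hk, if_neg Bool.false_ne_true]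
      exact ih d r hr
    · obtain ⟨hk, hh, hl, hr'⟩ := pvSpec_some hs
      simp only [pvFoldStep, hs]
      by_cases hrr : r' = r
      · subst hrr; subst hk; subst hh; subst hl
        have hbeq : (pvKeyOf r' == pvKeyOf r') = true := by simp
        rw [if_pos hbeq]
        by_cases hc : d.contains r' = true
        · -- slot already bound: setdefault is a no-op and the old binding wins
          have : d.setdefault r' (pvRender (pvHeaderOf r') (pvLimitOf r') vs) = d := by
            simp [PySem.Dict.setdefault, hc]
          rw [this, ih d r' hr']
          rcases hg : d.get? r' with _ | w
          · rw [PySem.Dict.get?_eq_none_iff_contains] at hg; simp [hg] at hc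
          · simp [Option.or]
        · have hc' : d.contains r' = false := by simpa using hc
          rw [setdefault_of_not_contains d r' _ hc', ih _ r' hr',
            PySem.Dict.get?_insert]
          have : d.get? r' = none := by
            rw [PySem.Dict.get?_eq_none_iff_contains]; exact hc'
          simp [this, Option.or]
      · -- a different rank's key: neither the slot of r nor the lookup of keyOf r changes
        have hk2 : (k == pvKeyOf r) = false := by
          rw [beq_eq_false_iff_ne]
          intro hkk
          exact hrr (pvKeyOf_inj hr' hr (hk ▸ hkk))
        rw [if_neg (by simp [hk2])]
        by_cases hc : d.contains r' = true
        · have : d.setdefault r' (pvRender h' l' vs) = d := by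
            simp [PySem.Dict.setdefault, hc]
          rw [this]; exact ih d r hr
        · have hc' : d.contains r' = false := by simpa using hc
          rw [setdefault_of_not_contains d r' _ hc', ih _ r hr,
            PySem.Dict.get?_insert, if_neg (fun hh2 => hrr hh2.symm)]

-- the slot of rank r, after the fold from the empty dict, as a function of the input dict
lemma pvSlot_eq (rd : List (String × List String)) (r : Int) (hr : r ∈ pvRanks) :
    (((rd.foldl pvFoldStep PySem.Dict.empty).get? r).getD none)
      = pvRender (pvHeaderOf r) (pvLimitOf r) ((PySem.Dict.mk rd).getD (pvKeyOf r) []) := by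
  rw [pvFold_get? rd PySem.Dict.empty r hr]
  rw [show (PySem.Dict.empty : PySem.Dict Int (Option String)).get? r = none from rfl]
  rw [PySem.Dict.getD_eq_get?_getD]
  rcases (PySem.Dict.mk rd).get? (pvKeyOf r) with _ | vs
  · simp [Option.or, pvRender]
  · simp [Option.or]

lemma pv_ite_append (c : Prop) [Decidable c] (l : List String) (x : String) :
    (if c then l ++ [x] else l) = l ++ (if c then [x] else []) := by split_ifs <;> simp

lemma pv_slice_none_none (xs : List String) : PySem.List.slice xs none none = xs := by
  simp [PySem.List.slice]

lemma pv_filterMap_id_cons (o : Option String) (l : List (Option String)) :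
    List.filterMap id (o :: l) = o.toList ++ List.filterMap id l := by
  cases o <;> simp

lemma pv_ite_toList (c : Prop) [Decidable c] (x : String) :
    (if c then some x else none).toList = if c then [x] else [] := by
  split_ifs <;> rfl

-- ===== VERDICT =====
set_option maxHeartbeats 1000000 in
theorem build_deep_research_context_py_spec : Claim_equal_build_deep_research_context_py := by
  intro rd _
  show build_deep_research_context_py rd = build_deep_research_context_py_alt rd
  unfold build_deep_research_context_py_alt
  rw [show PySem.List.pyRange 0 9 1 = pvRanks by decide]
  simp only [pvRanks, List.map_cons, List.map_nil]
  rw [pvSlot_eq rd 0 (by decide), pvSlot_eq rd 1 (by decide), pvSlot_eq rd 2 (by decide),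
      pvSlot_eq rd 3 (by decide), pvSlot_eq rd 4 (by decide), pvSlot_eq rd 5 (by decide),
      pvSlot_eq rd 6 (by decide), pvSlot_eq rd 7 (by decide), pvSlot_eq rd 8 (by decide)]
  simp only [pvRender, pvHeaderOf, pvKeyOf, pvLimitOf,
    pv_filterMap_id_cons, pv_ite_toList, List.filterMap_nil]
  norm_num only
  unfold build_deep_research_context_py
  simp only [pvGet, pv_ite_append]
  simp only [List.append_assoc, List.nil_append, List.append_nil]
  simp only [if_true, if_false, pv_slice_none_none]
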